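-- pv_equiv track=rewrite | github.com/IzmailovES/euler_project | problem439.py | multi_d
-- ===== SOURCE A (Python) =====
-- def prime_d(x,y):
--     return (x+1) if y == 1 else (( x**(y+1) -1) // (x-1))
--
-- def multi_d(dct, dct2 = dict()):
--     # all items in dct are prime:power
--     ret = 1
--     for x,y in dct.items():
--         ret *= prime_d(x,y) #)((x+1) if y == 1 else ((x**(y+1) -1)//(x - 1)))
--     for x,y in dct2.items():
--         if x in dct:
--             ret *= prime_d(x,y+dct[x])
--             ret //= prime_d(x,dct[x])
--         else:
--             ret *= prime_d(x,y)
--     return ret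
-- ===== SOURCE B (Python) =====
-- def prime_d(x, y):
--     return (x + 1) if y == 1 else ((x ** (y + 1) - 1) // (x - 1))
--
-- def multi_d(dct, dct2=dict()):
--     # merge the two exponent maps first, then take one uniform product
--     merged = dict(dct)
--     for x, y in dct2.items():
--         merged[x] = merged.get(x, 0) + y
--     ret = 1
--     for x, y in merged.items():
--         ret *= prime_d(x, y)
--     return ret
-- ===== Notes on version B (the rewrite author's own statement) =====
-- stated objective: simpler
-- what changed: B first merges the two exponent dicts (merged[x] = merged.get(x,0)+y) and then takes a single uniform product of prime_d over the merged factorization, eliminating A's second loop with its branch and multiply-then-floor-divide compensation (no big-int floor divisions at all); equal because A's running product always contains the factor prime_d(x, dct[x]) it later divides out exactly.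
import Mathlib
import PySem

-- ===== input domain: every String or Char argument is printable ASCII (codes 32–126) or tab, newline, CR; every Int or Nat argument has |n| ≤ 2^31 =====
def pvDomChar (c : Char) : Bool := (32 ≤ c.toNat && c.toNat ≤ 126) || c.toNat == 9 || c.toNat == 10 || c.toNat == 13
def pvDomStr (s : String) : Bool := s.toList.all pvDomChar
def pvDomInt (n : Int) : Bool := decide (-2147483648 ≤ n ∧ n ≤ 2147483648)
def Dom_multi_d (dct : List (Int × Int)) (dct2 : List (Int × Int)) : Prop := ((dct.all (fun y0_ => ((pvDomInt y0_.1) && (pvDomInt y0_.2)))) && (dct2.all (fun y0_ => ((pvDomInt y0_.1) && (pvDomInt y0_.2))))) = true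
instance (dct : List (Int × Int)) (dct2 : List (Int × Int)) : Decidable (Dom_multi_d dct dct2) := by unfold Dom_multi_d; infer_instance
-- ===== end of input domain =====

-- B merges the two exponent dicts first and takes one uniform product, replacing A's second loop's
-- multiply-then-floor-divide compensation; objective: simpler (same asymptotic cost).

-- ===== PORT A =====
-- prime_d: 'x ** (y + 1)' is ported with the Nat exponent (y + 1).toNat — exact whenever y + 1 ≥ 0
-- (Pre_ guarantees this for every call A makes; for y + 1 < 0 Python produces a float or raises);
-- '//' is PySem.Int.floordiv, and Pre_ keeps x ≠ 1 in that branch (else Python raises ZeroDivisionError).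
def prime_d (x : Int) (y : Int) : Int :=
  if y = 1 then x + 1 else PySem.Int.floordiv (x ^ (y + 1).toNat - 1) (x - 1)

def multi_d (dct : List (Int × Int)) (dct2 : List (Int × Int)) : Int :=
  let d := PySem.Dict.ofList dct
  let d2 := PySem.Dict.ofList dct2
  let ret := d.items.foldl (fun r p => r * prime_d p.1 p.2) 1
  d2.items.foldl (fun r p =>
    if d.contains p.1 then
      PySem.Int.floordiv (r * prime_d p.1 (p.2 + d.getD p.1 0)) (prime_d p.1 (d.getD p.1 0))
    else r * prime_d p.1 p.2) ret

-- ===== PORT B =====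
def multi_d_alt (dct : List (Int × Int)) (dct2 : List (Int × Int)) : Int :=
  let merged := (PySem.Dict.ofList dct2).items.foldl
      (fun m p => m.insert p.1 (m.getD p.1 0 + p.2)) (PySem.Dict.ofList dct)
  merged.items.foldl (fun r p => r * prime_d p.1 p.2) 1

-- ===== PRECONDITION & SPEC =====
-- okPD x y: Python's prime_d(x, y) returns an int (exponent 1, or nonnegative y + 1 with base ≠ 1).
def okPD (x : Int) (y : Int) : Bool := decide (y = 1 ∨ (-1 ≤ y ∧ x ≠ 1))
-- nzPD x y: that int is nonzero (closed form: x ≠ -1 for y = 1; else y ≠ -1 and not (x = -1 with odd y)).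
def nzPD (x : Int) (y : Int) : Bool :=
  decide (if y = 1 then x ≠ -1 else y ≠ -1 ∧ (x ≠ -1 ∨ y % 2 ≠ 1))

-- Pre_ is exactly the set of inputs on which Python's A returns an int: every prime_d call A makes must
-- satisfy okPD (else a float result or ZeroDivisionError/0**negative inside prime_d), and on keys shared
-- by both dicts the divisor prime_d(x, dct[x]) of 'ret //= ...' must be nonzero (else ZeroDivisionError).
def Pre_multi_d (dct : List (Int × Int)) (dct2 : List (Int × Int)) : Prop :=
  (∀ p ∈ (PySem.Dict.ofList dct).items, okPD p.1 p.2 = true) ∧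
  (∀ p ∈ (PySem.Dict.ofList dct2).items,
    (if (PySem.Dict.ofList dct).contains p.1 then
       okPD p.1 (p.2 + (PySem.Dict.ofList dct).getD p.1 0)
         && nzPD p.1 ((PySem.Dict.ofList dct).getD p.1 0)
         && okPD p.1 ((PySem.Dict.ofList dct).getD p.1 0)
     else okPD p.1 p.2) = true)
instance (dct : List (Int × Int)) (dct2 : List (Int × Int)) : Decidable (Pre_multi_d dct dct2) := by
  unfold Pre_multi_d; infer_instance

def pvWitness_multi_d : (List (Int × Int)) × (List (Int × Int)) := ([(2, 3), (3, 1)], [(2, 1), (5, 2)])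

def Spec_multi_d (dct : List (Int × Int)) (dct2 : List (Int × Int)) (out : Int) : Prop := out = multi_d_alt dct dct2
instance (dct : List (Int × Int)) (dct2 : List (Int × Int)) (out : Int) : Decidable (Spec_multi_d dct dct2 out) := by unfold Spec_multi_d; infer_instance

-- ===== CLAIM (what is proved, stated in full; the proofs are below) =====
def Claim_equal_multi_d : Prop := ∀ (dct : List (Int × Int)) (dct2 : List (Int × Int)), Dom_multi_d dct dct2 → Pre_multi_d dct dct2 → Spec_multi_d dct dct2 (multi_d dct dct2)

-- ===== LEMMAS AND PROOFS =====

-- A product-accumulating foldl is the accumulator times the product of the mapped list.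
theorem foldl_mul_prime_d (l : List (Int × Int)) (a : Int) :
    l.foldl (fun r p => r * prime_d p.1 p.2) a = a * (l.map (fun p => prime_d p.1 p.2)).prod := by
  induction l generalizing a with
  | nil => simp
  | cons p t ih => simp only [List.foldl_cons, List.map_cons, List.prod_cons, ih]; ring

-- prime_d is nonzero wherever okPD and nzPD hold (via prime_d x y = geometric sum for y ≠ 1).
theorem prime_d_ne_zero (x y : Int) (hok : okPD x y = true) (hnz : nzPD x y = true) :
    prime_d x y ≠ 0 := by
  simp only [okPD, nzPD, decide_eq_true_eq] at hok hnz
  unfold prime_d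
  by_cases hy : y = 1
  · rw [if_pos hy] at hnz ⊢
    omega
  · rw [if_neg hy] at hnz ⊢
    obtain ⟨hym, hx1⟩ := hok.resolve_left hy
    obtain ⟨hyn1, hx⟩ := hnz
    set n := (y + 1).toNat with hn
    have hn1 : 1 ≤ n := by omega
    have hgeom : (∑ i ∈ Finset.range n, x ^ i) * (x - 1) = x ^ n - 1 := geom_sum_mul x n
    have hx1' : x - 1 ≠ 0 := by omega
    have hdiv : PySem.Int.floordiv (x ^ n - 1) (x - 1) = ∑ i ∈ Finset.range n, x ^ i := by
      show Int.fdiv (x ^ n - 1) (x - 1) = _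
      rw [← hgeom, Int.mul_fdiv_cancel _ hx1']
    rw [hdiv]
    intro hS0
    have h0 : x ^ n - 1 = 0 := by rw [← hgeom, hS0, zero_mul]
    have hxn : x ^ n = 1 := by omega
    by_cases hxm : x = -1
    · have hye : y % 2 ≠ 1 := hx.resolve_left (not_not_intro hxm)
      have hnodd : n % 2 = 1 := by omega
      have : x ^ n = -1 := by
        rw [hxm, Odd.neg_one_pow (Nat.odd_iff.mpr hnodd)]
      omega
    · have hdvd : x ∣ (1 : Int) := by
        rw [← hxn]; exact dvd_pow_self x (by omega)
      have := Int.isUnit_iff.mp (isUnit_of_dvd_one hdvd)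
      rcases this with h | h
      · exact hx1 h
      · exact hxm h

-- Updating one key's exponent in the factor list multiplies the product by the new factor over the old.
theorem prod_map_update (l : List (Int × Int)) (x e v : Int)
    (hnd : (l.map Prod.fst).Nodup) (hmem : (x, e) ∈ l) :
    ((l.map (fun p => if p.1 == x then (x, v) else p)).map (fun p => prime_d p.1 p.2)).prod
        * prime_d x e
      = (l.map (fun p => prime_d p.1 p.2)).prod * prime_d x v := by
  induction l with
  | nil => cases hmem
  | cons p t ih =>
    simp only [List.map_cons, List.nodup_cons] at hnd
    by_cases hp : p.1 = x
    · have hpe : p = (x, e) := by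
        rcases List.mem_cons.mp hmem with h | h
        · exact h.symm
        · exact absurd (hp ▸ List.mem_map.mpr ⟨(x, e), h, rfl⟩) hnd.1
      have htid : t.map (fun p => if p.1 == x then (x, v) else p) = t := by
        conv_rhs => rw [← List.map_id t]
        apply List.map_congr_left
        intro q hq
        have hqx : q.1 ≠ x := fun hqx => hnd.1 (hp ▸ List.mem_map.mpr ⟨q, hq, hqx⟩)
        simp [hqx]
      subst hpe
      simp only [List.map_cons, beq_self_eq_true, if_pos, htid, List.prod_cons]
      ring
    · have hkeep : (if (p.1 == x) = true then (x, v) else p) = p := by simp [hp]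
      have hmem' : (x, e) ∈ t := by
        rcases List.mem_cons.mp hmem with h | h
        · exact absurd (congrArg Prod.fst h.symm) hp
        · exact h
      simp only [List.map_cons, hkeep, List.prod_cons, mul_assoc]
      rw [ih hnd.2 hmem']

-- Loop invariant for A's second loop: the A-accumulator is the product of the merged dict built so far.
theorem second_loop (d : PySem.Dict Int Int) (T : List (Int × Int)) (m : PySem.Dict Int Int)
    (r : Int)
    (hmnd : m.keys.Nodup)
    (hTnd : (T.map Prod.fst).Nodup)
    (hr : r = (m.items.map (fun p => prime_d p.1 p.2)).prod)
    (hun : ∀ p ∈ T, m.get? p.1 = d.get? p.1)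
    (hpre : ∀ p ∈ T,
      (if d.contains p.1 then
         okPD p.1 (p.2 + d.getD p.1 0) && nzPD p.1 (d.getD p.1 0) && okPD p.1 (d.getD p.1 0)
       else okPD p.1 p.2) = true) :
    T.foldl (fun r p =>
        if d.contains p.1 then
          PySem.Int.floordiv (r * prime_d p.1 (p.2 + d.getD p.1 0)) (prime_d p.1 (d.getD p.1 0))
        else r * prime_d p.1 p.2) r
      = ((T.foldl (fun m p => m.insert p.1 (m.getD p.1 0 + p.2)) m).items.map
          (fun p => prime_d p.1 p.2)).prod := by
  induction T generalizing m r with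
  | nil => simpa using hr
  | cons q T ih =>
    obtain ⟨x, y⟩ := q
    simp only [List.map_cons, List.nodup_cons] at hTnd
    have hg : m.get? x = d.get? x := hun (x, y) (List.mem_cons_self)
    have hpq := hpre (x, y) (List.mem_cons_self)
    simp only [List.foldl_cons]
    by_cases hc : d.contains x = true
    · -- shared key: floor division is exact because the old factor divides the running product
      have hsome : (d.get? x).isSome := by rw [← PySem.Dict.contains_eq_isSome_get?]; exact hc
      obtain ⟨e, he⟩ := Option.isSome_iff_exists.mp hsome
      have hde : d.getD x 0 = e := PySem.Dict.getD_of_get?_eq_some d (d0 := (0 : Int)) he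
      have hme : m.get? x = some e := by rw [hg, he]
      have hmde : m.getD x 0 = e := PySem.Dict.getD_of_get?_eq_some m (d0 := (0 : Int)) hme
      have hmc : m.contains x = true := by rw [PySem.Dict.contains_eq_isSome_get?, hme]; rfl
      have hmem : (x, e) ∈ m.items := PySem.Dict.mem_items_of_get?_eq_some m hme
      have hndm : (m.items.map Prod.fst).Nodup := by
        simpa only [PySem.Dict.keys] using hmnd
      have hitems := PySem.Dict.items_insert_of_contains (d := m) (v := e + y) hmc
      rw [if_pos hc, hde, Bool.and_eq_true, Bool.and_eq_true] at hpq
      have hok1 : okPD x e = true := hpq.2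
      have hnz1 : nzPD x e = true := hpq.1.2
      have hPne : prime_d x e ≠ 0 := prime_d_ne_zero x e hok1 hnz1
      have hupd := prod_map_update m.items x e (e + y) hndm hmem
      have hstep :
          PySem.Int.floordiv (r * prime_d x (y + d.getD x 0)) (prime_d x (d.getD x 0))
            = (((m.insert x (m.getD x 0 + y)).items).map (fun p => prime_d p.1 p.2)).prod := by
        rw [hde, hmde, hr]
        have hyx : y + e = e + y := by ring
        rw [hyx, ← hupd, hitems]
        show Int.fdiv _ _ = _
        rw [Int.mul_fdiv_cancel _ hPne]
      rw [if_pos hc, hstep]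
      apply ih (m.insert x (m.getD x 0 + y))
      · exact PySem.Dict.nodup_keys_insert m _ _ hmnd
      · exact hTnd.2
      · rfl
      · intro p hp
        have hpx : p.1 ≠ x := by
          intro h
          exact hTnd.1 (h ▸ List.mem_map.mpr ⟨p, hp, rfl⟩)
        rw [PySem.Dict.get?_insert_of_ne m _ hpx]
        exact hun p (List.mem_cons_of_mem _ hp)
      · intro p hp
        exact hpre p (List.mem_cons_of_mem _ hp)
    · -- fresh key: the insert appends one new factor
      have hcf : d.contains x = false := by simpa using hc
      have hmc : m.contains x = false := by
        rw [PySem.Dict.contains_eq_isSome_get?, hg, ← PySem.Dict.contains_eq_isSome_get?]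
        exact hcf
      have hmde : m.getD x 0 = 0 := PySem.Dict.getD_of_not_contains m (d0 := (0 : Int)) hmc
      have hitems := PySem.Dict.items_insert_of_not_contains (d := m) (v := m.getD x 0 + y) hmc
      have hstep : r * prime_d x y
          = (((m.insert x (m.getD x 0 + y)).items).map (fun p => prime_d p.1 p.2)).prod := by
        rw [hr, hitems, hmde]
        simp
      rw [if_neg hc, hstep]
      apply ih (m.insert x (m.getD x 0 + y))
      · exact PySem.Dict.nodup_keys_insert m _ _ hmnd
      · exact hTnd.2
      · rfl
      · intro p hp
        have hpx : p.1 ≠ x := by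
          intro h
          exact hTnd.1 (h ▸ List.mem_map.mpr ⟨p, hp, rfl⟩)
        rw [PySem.Dict.get?_insert_of_ne m _ hpx]
        exact hun p (List.mem_cons_of_mem _ hp)
      · intro p hp
        exact hpre p (List.mem_cons_of_mem _ hp)

-- ===== VERDICT (by name: the statement is the Claim_ definition above) =====
theorem multi_d_spec : Claim_equal_multi_d := by
  intro dct dct2 _ hpre
  unfold Spec_multi_d multi_d multi_d_alt
  simp only []
  obtain ⟨_, hpre2⟩ := hpre
  simp only [foldl_mul_prime_d, one_mul]
  exact second_loop (PySem.Dict.ofList dct) (PySem.Dict.ofList dct2).items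
    (PySem.Dict.ofList dct) _
    (PySem.Dict.nodup_keys_ofList dct)
    (by simpa only [PySem.Dict.keys] using PySem.Dict.nodup_keys_ofList dct2)
    rfl
    (fun p _ => rfl)
    hpre2
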